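-- pv_equiv track=rewrite | github.com/KrzysiekMiskowicz/WDI | Kolos_2019/Kolos_1/Zad_2_2.py | remove_one_row_and_two_columns
-- ===== SOURCE A (Python) =====
-- def multiple_of_square_of_natural_number(n):
--     divider = 2
--     multiple = 2
--     while divider * divider * 2 <= n:
--         while divider * divider * multiple <= n:
--             if divider * divider * multiple == n:
--                 return True
--             multiple += 1
--
--         multiple = 2
--         divider += 1
--
--     return False
--
-- def remove_one_row_and_two_columns(t):
--     n = len(t)
--     for r in range(n):
--         for r1 in range(n-1):
--             for r2 in range(r1+1, n):
--                 result = True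
--                 for i in range(n):
--                     if i != r:
--                         for j in range(n):
--                             if j != r1 and j != r2:
--                                 if not multiple_of_square_of_natural_number(t[i][j]):
--                                     result = False
--                                     break
--                     if not result:
--                         break
--
--                 if result:
--                     return True
--
--     return False
-- ===== SOURCE B (Python) =====
-- def _has_square_factor(v):
--     # v = d*d*m with d, m >= 2  <=>  some d >= 2 with 2*d*d <= v divides v by d*d
--     d = 2
--     while d * d * 2 <= v:
--         if v % (d * d) == 0:
--             return True
--         d += 1
--     return False
--
--
-- def remove_one_row_and_two_columns(t):
--     n = len(t)
--     if n < 2: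
--         return False
--     bad = [[not _has_square_factor(t[i][j]) for j in range(n)] for i in range(n)]
--     cnt = [sum(1 for i in range(n) if bad[i][j]) for j in range(n)]
--     for r in range(n):
--         # columns still containing a bad cell after deleting row r
--         u = sum(1 for j in range(n) if cnt[j] - (1 if bad[r][j] else 0) >= 1)
--         if u <= 2:
--             return True
--     return False
-- ===== Notes on version B (the rewrite author's own statement) =====
-- stated objective: faster
-- what changed: Instead of enumerating every (row, column-pair) and re-testing the expensive property per candidate, B tests each cell once into a bad-cell matrix, precomputes per-column bad counts, and for each removed row checks that at most 2 columns still contain a bad cell; the property test itself is a sqrt-bounded divisibility scan instead of A's nested multiple-enumeration.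
-- outside the precondition, e.g. on remove_one_row_and_two_columns([[7], [1, 1]]): A returns True, B raises IndexError
import Mathlib
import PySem

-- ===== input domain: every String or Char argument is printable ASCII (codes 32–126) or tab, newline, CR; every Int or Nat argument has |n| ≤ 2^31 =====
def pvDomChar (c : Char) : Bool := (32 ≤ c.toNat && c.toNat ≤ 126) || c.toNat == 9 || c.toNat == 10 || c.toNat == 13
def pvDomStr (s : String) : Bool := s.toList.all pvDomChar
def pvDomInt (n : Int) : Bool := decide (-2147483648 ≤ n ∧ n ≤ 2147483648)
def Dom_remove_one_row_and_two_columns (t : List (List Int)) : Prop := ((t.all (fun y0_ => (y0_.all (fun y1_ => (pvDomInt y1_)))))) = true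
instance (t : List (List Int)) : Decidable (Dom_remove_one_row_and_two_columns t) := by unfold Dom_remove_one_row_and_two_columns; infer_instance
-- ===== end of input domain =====

-- B replaces A's O(n^5)-loop-with-helper scan by a precomputed bad-cell matrix plus per-column
-- counts (objective: faster, asymptotic). Proved equal on square-or-wider matrices (Pre_).

-- ===== PORT A =====
-- inner 'while divider*divider*multiple <= n' loop of multiple_of_square_of_natural_number
def pvMsqInner (n d m : Int) (hd : 2 ≤ d) : Bool :=
  if h : d * d * m ≤ n then
    if d * d * m = n then true
    else pvMsqInner n d (m + 1) hd
  else false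
termination_by (n + 1 - d * d * m).toNat
decreasing_by
  have h4 : (4:Int) ≤ d * d := by nlinarith
  have : d * d * (m + 1) = d * d * m + d * d := by ring
  omega

-- outer 'while divider*divider*2 <= n' loop
def pvMsqOuter (n d : Int) (hd : 2 ≤ d) : Bool :=
  if h : d * d * 2 ≤ n then
    if pvMsqInner n d 2 hd then true
    else pvMsqOuter n (d + 1) (by omega)
  else false
termination_by (n + 1 - d * d * 2).toNat
decreasing_by
  have : (d + 1) * (d + 1) * 2 = d * d * 2 + (2 * d + 1) * 2 := by ring
  have : (0:Int) ≤ 2 * d + 1 := by omega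
  omega

def multiple_of_square_of_natural_number (n : Int) : Bool := pvMsqOuter n 2 (by norm_num)

-- the 'for i in range(n): … for j in range(n): …' check with its result flag and breaks
def pvCheckAll (t : List (List Int)) (n r r1 r2 : Int) : Bool :=
  (PySem.List.pyRange 0 n 1).all (fun i =>
    i == r ||
      (PySem.List.pyRange 0 n 1).all (fun j =>
        j == r1 || j == r2 ||
          multiple_of_square_of_natural_number
            (PySem.List.pyGetD (PySem.List.pyGetD t i []) j 0)))

def remove_one_row_and_two_columns (t : List (List Int)) : Bool :=
  let n : Int := t.length
  (PySem.List.pyRange 0 n 1).any (fun r =>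
    (PySem.List.pyRange 0 (n - 1) 1).any (fun r1 =>
      (PySem.List.pyRange (r1 + 1) n 1).any (fun r2 =>
        pvCheckAll t n r r1 r2)))

-- ===== PORT B =====
-- B's helper: 'while d*d*2 <= v: if v % (d*d) == 0: return True; d += 1'
def pvHasSqLoop (v d : Int) (hd : 2 ≤ d) : Bool :=
  if h : d * d * 2 ≤ v then
    if PySem.Int.mod v (d * d) = 0 then true
    else pvHasSqLoop v (d + 1) (by omega)
  else false
termination_by (v + 1 - d * d * 2).toNat
decreasing_by
  have : (d + 1) * (d + 1) * 2 = d * d * 2 + (2 * d + 1) * 2 := by ring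
  have : (0:Int) ≤ 2 * d + 1 := by omega
  omega

def pvHasSquareFactor (v : Int) : Bool := pvHasSqLoop v 2 (by norm_num)

-- B's 'bad' matrix: bad[i][j] = not _has_square_factor(t[i][j])
def pvBadMat (t : List (List Int)) : List (List Bool) :=
  (PySem.List.pyRange 0 (t.length : Int) 1).map (fun i =>
    (PySem.List.pyRange 0 (t.length : Int) 1).map (fun j =>
      ! pvHasSquareFactor (PySem.List.pyGetD (PySem.List.pyGetD t i []) j 0)))

-- B's 'cnt' list: cnt[j] = number of rows i with bad[i][j]
def pvCnt (t : List (List Int)) : List Int :=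
  (PySem.List.pyRange 0 (t.length : Int) 1).map (fun j =>
    (((PySem.List.pyRange 0 (t.length : Int) 1).filter (fun i =>
        PySem.List.pyGetD (PySem.List.pyGetD (pvBadMat t) i []) j false)).length : Int))

def remove_one_row_and_two_columns_alt (t : List (List Int)) : Bool :=
  if (t.length : Int) < 2 then false
  else
    (PySem.List.pyRange 0 (t.length : Int) 1).any (fun r =>
      decide ((((PySem.List.pyRange 0 (t.length : Int) 1).filter (fun j =>
          decide (1 ≤ PySem.List.pyGetD (pvCnt t) j 0 -
            (if PySem.List.pyGetD (PySem.List.pyGetD (pvBadMat t) r []) j false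
             then 1 else 0)))).length : Int) ≤ 2))

-- ===== PRECONDITION & SPEC =====
-- Pre_ excludes ragged matrices (a row shorter than len(t)); there Python A hits an IndexError on
-- most inputs but on some (e.g. [[7],[1,1]]) accidentally returns before reaching the short row,
-- while B always indexes every cell and raises.
def Pre_remove_one_row_and_two_columns (t : List (List Int)) : Prop :=
  ∀ row ∈ t, t.length ≤ row.length
instance (t : List (List Int)) : Decidable (Pre_remove_one_row_and_two_columns t) := by
  unfold Pre_remove_one_row_and_two_columns; infer_instance

def pvWitness_remove_one_row_and_two_columns : List (List Int) := [[8, 1], [8, 8]]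

def Spec_remove_one_row_and_two_columns (t : List (List Int)) (out : Bool) : Prop :=
  out = remove_one_row_and_two_columns_alt t
instance (t : List (List Int)) (out : Bool) :
    Decidable (Spec_remove_one_row_and_two_columns t out) := by
  unfold Spec_remove_one_row_and_two_columns; infer_instance

-- ===== CLAIM (what is proved, stated in full; the proofs are below) =====
def Claim_equal_remove_one_row_and_two_columns : Prop :=
  ∀ (t : List (List Int)), Dom_remove_one_row_and_two_columns t →
    Pre_remove_one_row_and_two_columns t →
    Spec_remove_one_row_and_two_columns t (remove_one_row_and_two_columns t)

-- ===== LEMMAS AND PROOFS =====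

theorem pvMsqInner_eq (n d m : Int) (hd : 2 ≤ d) :
    pvMsqInner n d m hd = decide (d * d * m ≤ n ∧ (d * d : Int) ∣ n) := by
  fun_induction pvMsqInner n d m hd with
  | case1 m h heq =>
    exact (decide_eq_true ⟨h, heq ▸ ⟨m, by ring⟩⟩).symm
  | case2 m h hne ih =>
    rw [ih]
    have h4 : (4:Int) ≤ d * d := by nlinarith
    simp only [decide_eq_decide]
    constructor
    · rintro ⟨hle, hdvd⟩
      exact ⟨by nlinarith, hdvd⟩
    · rintro ⟨hle, hdvd⟩
      obtain ⟨k, hk⟩ := hdvd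
      have hkm : m ≤ k := by nlinarith
      have hkm' : m ≠ k := fun e => hne (by rw [hk, e])
      have hk1 : m + 1 ≤ k := by omega
      refine ⟨?_, ⟨k, hk⟩⟩
      nlinarith
  | case3 m h =>
    exact (decide_eq_false (fun hc => h hc.1)).symm

theorem pvMsqOuter_eq_loop (n d : Int) (hd : 2 ≤ d) :
    pvMsqOuter n d hd = pvHasSqLoop n d hd := by
  fun_induction pvMsqOuter n d hd with
  | case1 d hd h hin =>
    rw [pvHasSqLoop]
    rw [pvMsqInner_eq] at hin
    have hdvd : (d * d : Int) ∣ n := by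
      have := of_decide_eq_true hin
      exact this.2
    rw [dif_pos h, if_pos ((PySem.Int.mod_eq_zero_iff_dvd n (d * d)).mpr hdvd)]
  | case2 d hd h hin ih =>
    rw [pvHasSqLoop, dif_pos h, ih]
    rw [pvMsqInner_eq] at hin
    have : ¬ (d * d : Int) ∣ n := by
      intro hdvd
      exact hin (decide_eq_true ⟨h, hdvd⟩)
    rw [if_neg (fun hm => this ((PySem.Int.mod_eq_zero_iff_dvd n (d * d)).mp hm))]
  | case3 d hd h =>
    rw [pvHasSqLoop, dif_neg h]

theorem pvMsq_eq_hasSq (v : Int) :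
    multiple_of_square_of_natural_number v = pvHasSquareFactor v :=
  pvMsqOuter_eq_loop v 2 (by norm_num)

-- a cell that fails the property (both ports read cells through the same pyGetD defaults)
def pvBadCell (t : List (List Int)) (i j : Int) : Bool :=
  ! pvHasSquareFactor (PySem.List.pyGetD (PySem.List.pyGetD t i []) j 0)

-- column j still contains a bad cell after deleting row r
def pvColQ (t : List (List Int)) (r j : Int) : Bool :=
  (PySem.List.pyRange 0 (t.length : Int) 1).any (fun i => !(i == r) && pvBadCell t i j)

theorem pvColQ_iff (t : List (List Int)) (r j : Int) :
    pvColQ t r j = true ↔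
      ∃ i, (0 ≤ i ∧ i < (t.length : Int)) ∧ i ≠ r ∧ pvBadCell t i j = true := by
  simp [pvColQ, List.any_eq_true, PySem.List.mem_pyRange_one, and_assoc]

theorem pvBadMat_get (t : List (List Int)) (i j : Int)
    (hi0 : 0 ≤ i) (hin : i < (t.length : Int)) (hj0 : 0 ≤ j) (hjn : j < (t.length : Int)) :
    PySem.List.pyGetD (PySem.List.pyGetD (pvBadMat t) i []) j false = pvBadCell t i j := by
  unfold pvBadMat
  rw [PySem.List.pyGetD_map_pyRange_of_nonneg _ _ _ _ hi0 hin,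
      PySem.List.pyGetD_map_pyRange_of_nonneg _ _ _ _ hj0 hjn]
  rfl

theorem pvCnt_get (t : List (List Int)) (j : Int)
    (hj0 : 0 ≤ j) (hjn : j < (t.length : Int)) :
    PySem.List.pyGetD (pvCnt t) j 0
      = (((PySem.List.pyRange 0 (t.length : Int) 1).filter (fun i => pvBadCell t i j)).length : Int) := by
  unfold pvCnt
  rw [PySem.List.pyGetD_map_pyRange_of_nonneg _ _ _ _ hj0 hjn]
  congr 1
  refine congrArg _ (List.filter_congr (fun i hi => ?_))
  have hib := (PySem.List.mem_pyRange_one).mp hi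
  exact pvBadMat_get t i j hib.1 hib.2 hj0 hjn

theorem pvFilterPos (l : List Int) (p : Int → Bool) :
    (0 < (l.filter p).length) ↔ ∃ a ∈ l, p a := by
  rw [List.length_pos_iff]
  constructor
  · rintro h
    obtain ⟨a, ha⟩ := List.exists_mem_of_ne_nil _ h
    exact ⟨a, (List.mem_filter.mp ha).1, (List.mem_filter.mp ha).2⟩
  · rintro ⟨a, ha, hp⟩ h
    exact (List.eq_nil_iff_forall_not_mem.mp h a) (List.mem_filter.mpr ⟨ha, hp⟩)

theorem pvCount_iff (b : Int → Bool) (n r : Int) (h0 : 0 ≤ r) (hr : r < n) :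
    (1 ≤ ((((PySem.List.pyRange 0 n 1).filter b).length : Int) - (if b r then 1 else 0)))
      ↔ ∃ i, (0 ≤ i ∧ i < n) ∧ i ≠ r ∧ b i = true := by
  have hsplit : PySem.List.pyRange 0 n 1
      = PySem.List.pyRange 0 r 1 ++ (PySem.List.pyRange r (r + 1) 1 ++ PySem.List.pyRange (r + 1) n 1) := by
    rw [← PySem.List.pyRange_one_append r (r + 1) n (by omega) (by omega),
        ← PySem.List.pyRange_one_append 0 r n h0 (le_of_lt hr)]
  rw [hsplit, PySem.List.pyRange_one_singleton]
  simp only [List.filter_append, List.length_append]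
  have hmid : ((List.filter b [r]).length : Int) = (if b r then 1 else 0) := by
    cases h : b r <;> simp [h]
  have key : (1:Int) ≤ (((PySem.List.pyRange 0 r 1).filter b).length : Int)
        + (((List.filter b [r]).length : Int) + (((PySem.List.pyRange (r + 1) n 1).filter b).length : Int))
        - (if b r then 1 else 0)
      ↔ 0 < ((PySem.List.pyRange 0 r 1).filter b).length
        ∨ 0 < ((PySem.List.pyRange (r + 1) n 1).filter b).length := by
    rw [hmid]; omega
  push_cast
  push_cast at key
  rw [key, pvFilterPos, pvFilterPos]
  simp only [PySem.List.mem_pyRange_one]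
  constructor
  · rintro (⟨i, ⟨hi0, hi1⟩, hb⟩ | ⟨i, ⟨hi0, hi1⟩, hb⟩)
    · exact ⟨i, ⟨hi0, by omega⟩, by omega, hb⟩
    · exact ⟨i, ⟨by omega, hi1⟩, by omega, hb⟩
  · rintro ⟨i, ⟨hi0, hi1⟩, hne, hb⟩
    rcases lt_or_gt_of_ne hne with h | h
    · exact Or.inl ⟨i, ⟨hi0, h⟩, hb⟩
    · exact Or.inr ⟨i, ⟨by omega, hi1⟩, hb⟩

theorem pvCardLe (Q : Int → Bool) (n r1 r2 : Int)
    (h : ∀ j, 0 ≤ j → j < n → Q j = true → j = r1 ∨ j = r2) :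
    ((PySem.List.pyRange 0 n 1).filter Q).length ≤ 2 := by
  set F := (PySem.List.pyRange 0 n 1).filter Q with hF
  have hnd : F.Nodup := (PySem.List.nodup_pyRange_one 0 n).filter _
  have hsub : F ⊆ [r1, r2] := by
    intro x hx
    have hx' := List.mem_filter.mp hx
    have hb := (PySem.List.mem_pyRange_one).mp hx'.1
    rcases h x hb.1 hb.2 hx'.2 with h' | h' <;> simp [h']
  calc F.length = F.toFinset.card := (List.toFinset_card_of_nodup hnd).symm
    _ ≤ ([r1, r2] : List Int).toFinset.card := by
        refine Finset.card_le_card ?_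
        intro x hx
        rw [List.mem_toFinset] at *
        exact hsub hx
    _ ≤ ([r1, r2] : List Int).length := List.toFinset_card_le _
    _ = 2 := rfl

theorem pvChoosePair (Q : Int → Bool) (n : Int) (hn : 2 ≤ n)
    (h : ((PySem.List.pyRange 0 n 1).filter Q).length ≤ 2) :
    ∃ r1, (0 ≤ r1 ∧ r1 < n - 1) ∧ ∃ r2, (r1 + 1 ≤ r2 ∧ r2 < n) ∧
      ∀ j, 0 ≤ j → j < n → j ≠ r1 → j ≠ r2 → Q j = false := by
  set F := (PySem.List.pyRange 0 n 1).filter Q with hFdef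
  have hmem : ∀ j, 0 ≤ j → j < n → Q j = true → j ∈ F := by
    intro j h0 h1 hq
    exact List.mem_filter.mpr ⟨(PySem.List.mem_pyRange_one).mpr ⟨h0, h1⟩, hq⟩
  have hbnd : ∀ j ∈ F, 0 ≤ j ∧ j < n := by
    intro j hj
    exact (PySem.List.mem_pyRange_one).mp (List.mem_filter.mp hj).1
  have hsort : F.Pairwise (· < ·) :=
    List.Pairwise.sublist (List.filter_sublist) (PySem.List.pairwise_lt_pyRange_one 0 n)
  match hF : F with
  | [] =>
    refine ⟨0, ⟨le_refl 0, by omega⟩, n - 1, ⟨by omega, by omega⟩, ?_⟩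
    intro j h0 h1 _ _
    cases hq : Q j
    · rfl
    · simpa using hmem j h0 h1 hq
  | [a] =>
    have ha := hbnd a (List.mem_singleton_self a)
    refine ⟨if a = n - 1 then n - 2 else a, ⟨by split <;> omega, by split <;> omega⟩,
      n - 1, ⟨by split <;> omega, by omega⟩, ?_⟩
    intro j h0 h1 hj1 hj2
    cases hq : Q j
    · rfl
    · have : j = a := by simpa using hmem j h0 h1 hq
      subst this
      by_cases hcase : j = n - 1
      · exact absurd hcase hj2
      · rw [if_neg hcase] at hj1
        exact absurd rfl hj1
  | [a, b] =>
    have ha := hbnd a (by simp)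
    have hb := hbnd b (by simp)
    have hab : a < b := (List.pairwise_cons.mp hsort).1 b (List.mem_singleton_self b)
    refine ⟨a, ⟨ha.1, by omega⟩, b, ⟨by omega, hb.2⟩, ?_⟩
    intro j h0 h1 hj1 hj2
    cases hq : Q j
    · rfl
    · have : j = a ∨ j = b := by simpa using hmem j h0 h1 hq
      rcases this with h' | h' <;> [exact absurd h' hj1; exact absurd h' hj2]
  | a :: b :: c :: rest =>
    simp at h

theorem pvSwap (t : List (List Int)) (r r1 r2 : Int) :
    (∀ i, (0 ≤ i ∧ i < (t.length : Int)) → i = r ∨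
        ∀ j, (0 ≤ j ∧ j < (t.length : Int)) → j = r1 ∨ j = r2 ∨
          pvHasSquareFactor (PySem.List.pyGetD (PySem.List.pyGetD t i []) j 0) = true)
      ↔ (∀ j, 0 ≤ j → j < (t.length : Int) → j ≠ r1 → j ≠ r2 → pvColQ t r j = false) := by
  constructor
  · intro H j hj0 hjn hj1 hj2
    cases hq : pvColQ t r j
    · rfl
    · exfalso
      obtain ⟨i, hi, hir, hbad⟩ := (pvColQ_iff t r j).mp hq
      rcases H i hi with he | hall
      · exact hir he
      · rcases hall j ⟨hj0, hjn⟩ with e | e | hg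
        · exact hj1 e
        · exact hj2 e
        · simp [pvBadCell, hg] at hbad
  · intro H i hi
    by_cases he : i = r
    · exact Or.inl he
    · refine Or.inr (fun j hj => ?_)
      by_cases e1 : j = r1
      · exact Or.inl e1
      by_cases e2 : j = r2
      · exact Or.inr (Or.inl e2)
      refine Or.inr (Or.inr ?_)
      by_contra hg
      rw [Bool.not_eq_true] at hg
      have : pvColQ t r j = true :=
        (pvColQ_iff t r j).mpr ⟨i, hi, he, by simp [pvBadCell, hg]⟩
      rw [H j hj.1 hj.2 e1 e2] at this
      exact Bool.false_ne_true this

-- ===== VERDICT (by name: the statement is the Claim_ definition above) =====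
theorem remove_one_row_and_two_columns_spec : Claim_equal_remove_one_row_and_two_columns := by
  intro t _hdom _hpre
  unfold Spec_remove_one_row_and_two_columns
  rw [Bool.eq_iff_iff]
  by_cases hlt : (t.length : Int) < 2
  · constructor
    · intro hA
      exfalso
      have hnil : PySem.List.pyRange 0 ((t.length : Int) - 1) 1 = [] :=
        PySem.List.pyRange_one_eq_nil (by omega)
      simp only [remove_one_row_and_two_columns, List.any_eq_true, hnil] at hA
      simp at hA
    · intro hB
      exfalso
      simp only [remove_one_row_and_two_columns_alt, if_pos hlt] at hB
      exact Bool.false_ne_true hB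
  · have hA : remove_one_row_and_two_columns t = true ↔
        ∃ r, (0 ≤ r ∧ r < (t.length : Int)) ∧
          ∃ r1, (0 ≤ r1 ∧ r1 < (t.length : Int) - 1) ∧
            ∃ r2, (r1 + 1 ≤ r2 ∧ r2 < (t.length : Int)) ∧
              ∀ j, 0 ≤ j → j < (t.length : Int) → j ≠ r1 → j ≠ r2 → pvColQ t r j = false := by
      simp only [remove_one_row_and_two_columns, pvCheckAll, List.any_eq_true, List.all_eq_true,
        PySem.List.mem_pyRange_one, Bool.or_eq_true, beq_iff_eq, pvMsq_eq_hasSq]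
      refine exists_congr (fun r => and_congr_right (fun _ => ?_))
      refine exists_congr (fun r1 => and_congr_right (fun _ => ?_))
      refine exists_congr (fun r2 => and_congr_right (fun _ => ?_))
      simpa [or_assoc] using pvSwap t r r1 r2
    have hB : remove_one_row_and_two_columns_alt t = true ↔
        ∃ r, (0 ≤ r ∧ r < (t.length : Int)) ∧
          ((PySem.List.pyRange 0 (t.length : Int) 1).filter (pvColQ t r)).length ≤ 2 := by
      simp only [remove_one_row_and_two_columns_alt, if_neg hlt, List.any_eq_true,
        PySem.List.mem_pyRange_one, decide_eq_true_eq]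
      refine exists_congr (fun r => and_congr_right (fun hr => ?_))
      have hfil : (PySem.List.pyRange 0 (t.length : Int) 1).filter (fun j =>
            decide (1 ≤ PySem.List.pyGetD (pvCnt t) j 0 -
              (if PySem.List.pyGetD (PySem.List.pyGetD (pvBadMat t) r []) j false
               then 1 else 0)))
          = (PySem.List.pyRange 0 (t.length : Int) 1).filter (pvColQ t r) := by
        refine List.filter_congr (fun j hj => ?_)
        have hjb := (PySem.List.mem_pyRange_one).mp hj
        rw [pvCnt_get t j hjb.1 hjb.2, pvBadMat_get t r j hr.1 hr.2 hjb.1 hjb.2]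
        refine Bool.eq_iff_iff.mpr ?_
        rw [decide_eq_true_eq]
        exact (pvCount_iff (fun i => pvBadCell t i j) (t.length : Int) r hr.1 hr.2).trans
          (pvColQ_iff t r j).symm
      rw [hfil]
      exact ⟨fun h => by exact_mod_cast h, fun h => by exact_mod_cast h⟩
    rw [hA, hB]
    constructor
    · rintro ⟨r, hr, r1, hr1, r2, hr2, hall⟩
      refine ⟨r, hr, pvCardLe _ _ r1 r2 ?_⟩
      intro j h0 h1 hq
      by_contra hc
      push Not at hc
      rw [hall j h0 h1 hc.1 hc.2] at hq
      exact Bool.false_ne_true hq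
    · rintro ⟨r, hr, hle⟩
      obtain ⟨r1, hr1, r2, hr2, hall⟩ := pvChoosePair (pvColQ t r) _ (by omega) hle
      exact ⟨r, hr, r1, hr1, r2, hr2, hall⟩
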